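-- pv_equiv track=rewrite | github.com/Yks151/Dynamic-CAME-TD | Transformer_fuse.py | majority_voting
-- ===== SOURCE A (Python) =====
-- from collections import Counter
--
-- def majority_voting(predictions_list, num_samples_val, default_label):
--     final_predictions = []
--     for i in range(num_samples_val):
--         predictions_at_i = [predictions[i] for predictions in predictions_list if len(predictions) > i]
--         if not predictions_at_i:
--             final_predictions.append(default_label)
--         else:
--             count = Counter(predictions_at_i)
--             most_common_label = count.most_common(1)[0][0]
--             final_predictions.append(most_common_label)
--     return final_predictions
-- ===== SOURCE B (Python) =====
-- def majority_voting(predictions_list, num_samples_val, default_label):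
--     # One forward pass: build a per-index frequency table (dict per sample index,
--     # insertion order = first-seen label), then pick each index's first-seen max.
--     n = max(num_samples_val, 0)
--     counts = [{} for _ in range(n)]
--     for predictions in predictions_list:
--         for c, label in zip(counts, predictions):
--             c[label] = c.get(label, 0) + 1
--     result = []
--     for c in counts:
--         items = list(c.items())
--         if not items:
--             result.append(default_label)
--         else:
--             best, bestc = items[0]
--             for label, cnt in items[1:]:
--                 if cnt > bestc:
--                     best, bestc = label, cnt
--             result.append(best)
--     return result
-- ===== Notes on version B (the rewrite author's own statement) =====
-- stated objective: faster
-- what changed: Inverts the loop nesting: instead of re-scanning every prediction list for each sample index and sorting a Counter per index, B makes one pass over the prediction lists building a per-index frequency table, then a single linear scan per index picks the first-seen label with maximal count.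
import Mathlib
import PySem

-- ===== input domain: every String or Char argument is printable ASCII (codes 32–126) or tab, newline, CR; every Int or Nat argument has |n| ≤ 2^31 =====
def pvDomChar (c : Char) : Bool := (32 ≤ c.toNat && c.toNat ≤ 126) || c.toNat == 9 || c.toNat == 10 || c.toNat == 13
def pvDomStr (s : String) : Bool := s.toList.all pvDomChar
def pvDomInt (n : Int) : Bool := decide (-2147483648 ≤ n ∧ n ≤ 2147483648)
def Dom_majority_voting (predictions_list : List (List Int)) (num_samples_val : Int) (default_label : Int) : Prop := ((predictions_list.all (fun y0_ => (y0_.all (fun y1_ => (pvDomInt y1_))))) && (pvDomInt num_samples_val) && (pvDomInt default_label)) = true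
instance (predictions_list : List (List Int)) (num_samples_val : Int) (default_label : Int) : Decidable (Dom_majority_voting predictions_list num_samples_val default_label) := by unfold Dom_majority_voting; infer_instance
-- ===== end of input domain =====

-- B inverts the loop nesting: one pass over the prediction lists builds a per-index
-- frequency table, then a linear scan per index picks the first-seen maximal label
-- (instead of A's per-index column rebuild + Counter.most_common sort).


-- ===== PORT A =====
-- literal port: for i in range(num_samples_val): build the column (comprehension with
-- the len-guard; pyGet? is some under that guard), Counter it, take most_common(1)[0][0]
-- (= head of the stable descending sort of the items by count; headD's default is
-- unreachable since the branch guarantees a nonempty column).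
def majority_voting (predictions_list : List (List Int)) (num_samples_val : Int) (default_label : Int) : List Int :=
  (PySem.List.pyRange 0 num_samples_val 1).foldl (fun final_predictions i =>
    let predictions_at_i : List Int :=
      predictions_list.filterMap (fun predictions =>
        if i < (predictions.length : Int) then PySem.List.pyGet? predictions i else none)
    if predictions_at_i.isEmpty then
      final_predictions ++ [default_label]
    else
      let count := PySem.Dict.counter predictions_at_i
      let most_common_label :=
        ((PySem.List.sorted count.items (fun kv => kv.2) true).headD (0, 0)).1
      final_predictions ++ [most_common_label]) []

-- ===== PORT B =====
-- zip(counts, predictions): walk the table and the list together, bumping each dict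
def mvZipBump : List (PySem.Dict Int Int) → List Int → List (PySem.Dict Int Int)
  | [], _ => []
  | t, [] => t
  | c :: t, x :: xs => c.insert x (c.getD x 0 + 1) :: mvZipBump t xs

def majority_voting_alt (predictions_list : List (List Int)) (num_samples_val : Int) (default_label : Int) : List Int :=
  let n := max num_samples_val 0
  let counts := predictions_list.foldl mvZipBump (List.replicate n.toNat PySem.Dict.empty)
  counts.map (fun c =>
    match c.items with
    | [] => default_label
    | kv :: rest => (rest.foldl (fun b kv => if kv.2 > b.2 then kv else b) kv).1)

-- ===== PRECONDITION & SPEC =====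
def Spec_majority_voting (predictions_list : List (List Int)) (num_samples_val : Int) (default_label : Int) (out : List Int) : Prop := out = majority_voting_alt predictions_list num_samples_val default_label
instance (predictions_list : List (List Int)) (num_samples_val : Int) (default_label : Int) (out : List Int) : Decidable (Spec_majority_voting predictions_list num_samples_val default_label out) := by unfold Spec_majority_voting; infer_instance

-- ===== CLAIM (what is proved, stated in full; the proofs are below) =====
def Claim_equal_majority_voting : Prop := ∀ (predictions_list : List (List Int)) (num_samples_val : Int) (default_label : Int), Dom_majority_voting predictions_list num_samples_val default_label → Spec_majority_voting predictions_list num_samples_val default_label (majority_voting predictions_list num_samples_val default_label)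

-- ===== LEMMAS AND PROOFS =====

-- the column at index k: elements predictions[k] of every list long enough
def mvCol (pl : List (List Int)) (k : Nat) : List Int := pl.filterMap (fun p => p[k]?)

theorem mvZipBump_length (t : List (PySem.Dict Int Int)) (p : List Int) :
    (mvZipBump t p).length = t.length := by
  induction t generalizing p with
  | nil => cases p <;> rfl
  | cons c t ih => cases p with
    | nil => rfl
    | cons x xs => simp [mvZipBump, ih]

theorem mvZipBump_getElem? (t : List (PySem.Dict Int Int)) (p : List Int) (k : Nat) :
    (mvZipBump t p)[k]? =
      if h : k < p.length then (t[k]?).map (fun d => d.insert p[k] (d.getD p[k] 0 + 1))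
      else t[k]? := by
  induction t generalizing p k with
  | nil => cases p <;> simp [mvZipBump]
  | cons c t ih =>
    cases p with
    | nil => simp [mvZipBump]
    | cons x xs =>
      cases k with
      | zero => simp [mvZipBump]
      | succ k =>
        simp only [mvZipBump, List.getElem?_cons_succ, ih xs k]
        by_cases h : k < xs.length <;> simp [h]

theorem mvFoldl_getElem? (pl : List (List Int)) (t : List (PySem.Dict Int Int)) (k : Nat) :
    (pl.foldl mvZipBump t)[k]? =
      (t[k]?).map (fun d => (mvCol pl k).foldl (fun d x => d.insert x (d.getD x 0 + 1)) d) := by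
  induction pl generalizing t with
  | nil => simp [mvCol]
  | cons p pl ih =>
    simp only [List.foldl_cons, ih (mvZipBump t p), mvZipBump_getElem?]
    by_cases h : k < p.length
    · have hcol : mvCol (p :: pl) k = p[k] :: mvCol pl k := by
        have hsome : p[k]? = some p[k] := List.getElem?_eq_getElem h
        simp [mvCol, hsome]
      rw [dif_pos h, hcol, Option.map_map]
      rfl
    · have hnone : p[k]? = none := List.getElem?_eq_none_iff.mpr (by omega)
      have hcol : mvCol (p :: pl) k = mvCol pl k := by
        simp [mvCol, hnone]
      rw [dif_neg h, hcol]

theorem mvInsertBy_ne_nil {α : Type} (before : α → α → Bool) (x : α) (acc : List α) :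
    PySem.List.insertBy before x acc ≠ [] := by
  cases acc with
  | nil => simp [PySem.List.insertBy]
  | cons y ys =>
    simp only [PySem.List.insertBy]
    split <;> simp

-- head of the insertion-sort fold = the first-seen running max scan
theorem mvHead_foldl_insertBy (before : Int × Int → Int × Int → Bool)
    (rest : List (Int × Int)) (acc : List (Int × Int)) (d : Int × Int) (hacc : acc ≠ []) :
    (rest.foldl (fun a x => PySem.List.insertBy before x a) acc).headD d =
      rest.foldl (fun b x => if before x b then x else b) (acc.headD d) := by
  induction rest generalizing acc with
  | nil => rfl
  | cons x rest ih =>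
    obtain ⟨y, ys, rfl⟩ := List.exists_cons_of_ne_nil hacc
    simp only [List.foldl_cons]
    rw [ih _ (mvInsertBy_ne_nil before x (y :: ys))]
    congr 1
    simp only [PySem.List.insertBy, List.headD_cons]
    split <;> simp_all

theorem mvCounter_items_ne_nil (x : Int) (xs : List Int) :
    (PySem.Dict.counter (x :: xs)).items ≠ [] := by
  intro hnil
  have hx : x ∈ (PySem.Dict.counter (x :: xs)).keys := by
    rw [PySem.Dict.keys_counter]
    exact (PySem.Set.mem_ofList _ _).mpr List.mem_cons_self
  rw [PySem.Dict.keys, hnil] at hx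
  simp at hx

-- per-index agreement: A's column pick = B's table pick
theorem mvPointwise (pl : List (List Int)) (dl : Int) (k : Nat) :
    (if (pl.filterMap (fun p =>
          if (k : Int) < (p.length : Int) then PySem.List.pyGet? p (k : Int) else none)).isEmpty then dl
     else
       ((PySem.List.sorted
          (PySem.Dict.counter (pl.filterMap (fun p =>
            if (k : Int) < (p.length : Int) then PySem.List.pyGet? p (k : Int) else none))).items
          (fun kv => kv.2) true).headD (0, 0)).1) =
    (match (PySem.Dict.counter (mvCol pl k)).items with
     | [] => dl
     | kv :: rest => (rest.foldl (fun b kv => if kv.2 > b.2 then kv else b) kv).1) := by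
  have hpai : pl.filterMap (fun p =>
      if (k : Int) < (p.length : Int) then PySem.List.pyGet? p (k : Int) else none) = mvCol pl k := by
    unfold mvCol
    congr 1
    funext p
    by_cases h : k < p.length
    · have hsome : p[k]? = some p[k] := List.getElem?_eq_getElem h
      rw [if_pos (by exact_mod_cast h), PySem.List.pyGet?_natCast, hsome]
    · have hnone : p[k]? = none := List.getElem?_eq_none_iff.mpr (by omega)
      rw [if_neg (by exact_mod_cast h), hnone]
  rw [hpai]
  cases hcol : mvCol pl k with
  | nil => rfl
  | cons x xs =>
    cases hitems : (PySem.Dict.counter (x :: xs)).items with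
    | nil => exact absurd hitems (mvCounter_items_ne_nil x xs)
    | cons kv rest =>
      rw [if_neg (by simp)]
      rw [PySem.List.sorted_rev_eq_foldl_insertBy]
      simp only [List.foldl_cons]
      have h1 : PySem.List.insertBy (fun a b => decide (b.2 < a.2)) kv
          ([] : List (Int × Int)) = [kv] := by
        simp [PySem.List.insertBy]
      rw [h1, mvHead_foldl_insertBy _ rest [kv] (0, 0) (by simp)]
      simp [gt_iff_lt]

theorem mvMain (pl : List (List Int)) (n dl : Int) :
    majority_voting pl n dl = majority_voting_alt pl n dl := by
  unfold majority_voting majority_voting_alt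
  -- A's loop appends one element per index: turn it into a map over the range
  have hbody : ((PySem.List.pyRange 0 n 1).foldl (fun final_predictions i =>
      let predictions_at_i : List Int :=
        pl.filterMap (fun predictions =>
          if i < (predictions.length : Int) then PySem.List.pyGet? predictions i else none)
      if predictions_at_i.isEmpty then final_predictions ++ [dl]
      else
        let count := PySem.Dict.counter predictions_at_i
        let most_common_label :=
          ((PySem.List.sorted count.items (fun kv => kv.2) true).headD (0, 0)).1
        final_predictions ++ [most_common_label]) []) =
      (PySem.List.pyRange 0 n 1).map (fun i =>
        if (pl.filterMap (fun p =>
            if i < (p.length : Int) then PySem.List.pyGet? p i else none)).isEmpty then dl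
        else
          ((PySem.List.sorted
            (PySem.Dict.counter (pl.filterMap (fun p =>
              if i < (p.length : Int) then PySem.List.pyGet? p i else none))).items
            (fun kv => kv.2) true).headD (0, 0)).1) := by
    have hA := PySem.List.foldl_append_singleton_eq_map
        (f := fun i : Int =>
          if (pl.filterMap (fun p =>
              if i < (p.length : Int) then PySem.List.pyGet? p i else none)).isEmpty then dl
          else
            ((PySem.List.sorted
              (PySem.Dict.counter (pl.filterMap (fun p =>
                if i < (p.length : Int) then PySem.List.pyGet? p i else none))).items
              (fun kv => kv.2) true).headD (0, 0)).1)
        (l := PySem.List.pyRange 0 n 1) (acc := ([] : List Int))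
    rw [List.nil_append] at hA
    rw [← hA]
    congr 1
    funext acc i
    by_cases h : (pl.filterMap (fun p =>
        if i < (p.length : Int) then PySem.List.pyGet? p i else none)).isEmpty <;> simp [h]
  rw [hbody]
  set N := (max n 0).toNat with hN
  have hrange : PySem.List.pyRange 0 n 1 = (List.range N).map Int.ofNat := by
    rw [PySem.List.pyRange_one]
    have h0 : (n - 0).toNat = N := by omega
    rw [h0]
    refine List.map_congr_left (fun k _ => ?_)
    simp [Int.ofNat_eq_natCast]
  rw [hrange, List.map_map]
  set counts := pl.foldl mvZipBump (List.replicate N PySem.Dict.empty) with hcounts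
  have hlen : counts.length = N := by
    rw [hcounts]
    have hfold : ∀ (l : List (List Int)) (t : List (PySem.Dict Int Int)),
        (l.foldl mvZipBump t).length = t.length := by
      intro l
      induction l with
      | nil => intro t; rfl
      | cons p l ih => intro t; rw [List.foldl_cons, ih, mvZipBump_length]
    rw [hfold, List.length_replicate]
  apply List.ext_getElem?
  intro k
  rw [List.getElem?_map, List.getElem?_map]
  by_cases hk : k < N
  · have hr : (List.range N)[k]? = some k := by simp [hk]
    have hcountk : counts[k]? = some (PySem.Dict.counter (mvCol pl k)) := by
      rw [hcounts, mvFoldl_getElem?,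
          List.getElem?_eq_getElem (by simpa using hk)]
      simp [PySem.Dict.foldl_insert_getD_add_one_eq_counter]
    rw [hr, hcountk]
    simp only [Option.map_some, Option.some.injEq, Function.comp_apply]
    exact mvPointwise pl dl k
  · rw [List.getElem?_eq_none_iff.mpr (by simpa using hk),
        List.getElem?_eq_none_iff.mpr (by rw [hlen]; omega)]
    rfl

-- ===== VERDICT (by name: the statement is the Claim_ definition above) =====
theorem majority_voting_spec : Claim_equal_majority_voting := by
  intro pl n dl _
  unfold Spec_majority_voting
  exact mvMain pl n dl
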